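-- pv_equiv track=rewrite | github.com/MultiTSP/Backend | tsp.py | construct_tour
-- ===== SOURCE A (Python) =====
-- def minimum_spanning_tree(distance_matrix):
--     """Finds the Minimum Spanning Tree using Prim's algorithm."""
--     n = len(distance_matrix)
--     selected = [False] * n
--     min_edge = [(float('inf'), -1)] * n
--     min_edge[0] = (0, -1)
--     mst = []
--
--     for _ in range(n):
--         v = min((w, idx) for idx, (w, sel) in enumerate(min_edge) if not selected[idx])[1]
--         selected[v] = True
--         if min_edge[v][1] != -1:
--             mst.append((v, min_edge[v][1]))
--         for to in range(n):
--             if distance_matrix[v][to] < min_edge[to][0]: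
--                 min_edge[to] = (distance_matrix[v][to], v)
--     return mst
--
-- def adjacency_list(mst):
--     """Converts edge list to adjacency list."""
--     adj_list = {}
--     for u, v in mst:
--         adj_list.setdefault(u, []).append(v)
--         adj_list.setdefault(v, []).append(u)
--     return adj_list
--
-- def root(tree):
--     """Finds root nodes in the tree nodes with one connection."""
--     return [node for node, neighbors in tree.items() if len(neighbors) == 1]
--
-- def dfs(node, tree, tour, visited):
--     """Performs Depth-First Search (DFS) to generate a tour."""
--     visited[node] = True
--     tour.append(node)
--     for neighbor in tree[node]:
--         if not visited[neighbor]: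
--             dfs(neighbor, tree, tour, visited)
--
-- def tour_cost(tour, distance_matrix):
--     """Calculates the cost of a given tour."""
--     return sum(int(distance_matrix[tour[i]][tour[(i+1)%len(tour)]]) for i in range(len(tour)))
--
-- def construct_tour(distance_matrix):
--     """Constructs an initial tour using MST and DFS."""
--     mst = minimum_spanning_tree(distance_matrix)
--     sorted(mst, key=lambda x: distance_matrix[x[0]][x[1]])
--     tree = adjacency_list(mst)
--     root_nodes = root(tree)
--     best_tour = list(range(len(distance_matrix)))
--     for node in root_nodes:
--         visited = [False] * len(distance_matrix)
--         tour = []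
--         dfs(node, tree, tour, visited)
--         if tour_cost(tour, distance_matrix) < tour_cost(best_tour, distance_matrix):
--             best_tour = tour
--     return best_tour
-- ===== SOURCE B (Python) =====
-- def _prim(distance_matrix):
--     """Prim's MST with separate key/parent arrays and a sentinel scan."""
--     n = len(distance_matrix)
--     INF = float('inf')
--     key = [INF] * n
--     key[0] = 0
--     parent = [-1] * n
--     in_tree = [False] * n
--     mst = []
--     for _ in range(n):
--         v = -1
--         for u in range(n):
--             if not in_tree[u] and (v == -1 or key[u] < key[v]):
--                 v = u
--         in_tree[v] = True
--         if parent[v] != -1: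
--             mst.append((v, parent[v]))
--         row = distance_matrix[v]
--         for u in range(n):
--             if row[u] < key[u]:
--                 key[u] = row[u]
--                 parent[u] = v
--     return mst
--
--
-- def construct_tour(distance_matrix):
--     """MST + iterative stack DFS tour; cheapest candidate tour via min(key=)."""
--     n = len(distance_matrix)
--     adj = {}
--     for u, v in _prim(distance_matrix):
--         adj.setdefault(u, []).append(v)
--         adj.setdefault(v, []).append(u)
--
--     def cost(t):
--         return sum(distance_matrix[t[i - 1]][t[i]] for i in range(len(t)))
--
--     def stack_tour(r):
--         visited = [False] * n
--         tour = []
--         stack = [r]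
--         while stack:
--             x = stack.pop()
--             if visited[x]:
--                 continue
--             visited[x] = True
--             tour.append(x)
--             for nb in reversed(adj[x]):
--                 if not visited[nb]:
--                     stack.append(nb)
--         return tour
--
--     leaves = [x for x, nbs in adj.items() if len(nbs) == 1]
--     return min([list(range(n))] + [stack_tour(r) for r in leaves], key=cost)
-- ===== Notes on version B (the rewrite author's own statement) =====
-- stated objective: alternative
-- what changed: The recursive DFS becomes an explicit-stack iterative traversal (reversed pushes, visited re-checked at pop), Prim's list of (weight,prev) pairs with a tuple-min over a generator becomes separate key/parent arrays with a sentinel linear scan, the dead sorted() call and the per-leaf strict-< update loop are replaced by one min(candidates, key=cost), and the cost sums d[t[i-1]][t[i]] instead of using (i+1) % len.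
import Mathlib
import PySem

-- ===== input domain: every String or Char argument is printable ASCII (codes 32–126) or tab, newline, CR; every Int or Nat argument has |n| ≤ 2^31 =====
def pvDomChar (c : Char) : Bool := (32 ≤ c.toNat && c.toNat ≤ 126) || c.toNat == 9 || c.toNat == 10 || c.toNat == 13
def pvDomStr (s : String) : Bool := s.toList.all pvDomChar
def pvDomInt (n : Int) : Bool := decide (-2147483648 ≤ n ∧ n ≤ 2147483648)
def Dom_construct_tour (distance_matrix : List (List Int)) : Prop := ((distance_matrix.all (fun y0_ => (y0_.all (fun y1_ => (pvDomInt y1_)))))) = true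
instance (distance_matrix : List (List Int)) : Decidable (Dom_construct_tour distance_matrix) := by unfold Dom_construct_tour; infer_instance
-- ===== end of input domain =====

-- B replaces A's recursive DFS by an explicit-stack traversal, A's tuple-min Prim state (list of
-- (weight, prev) pairs) by separate key/parent arrays with a sentinel scan, and A's best-tour update
-- loop by a single min(candidates, key=cost); same return value on every input Pre_ admits.

-- ===== PORT A =====
-- shared low-level helpers (both Pythons read/write Python lists the same way)
def vget (xs : List Bool) (i : Int) : Bool := (PySem.List.pyGet? xs i).getD true
def vset (xs : List Bool) (i : Int) : List Bool := PySem.List.pySetD xs i true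
def dget (dm : List (List Int)) (v j : Int) : Int := PySem.List.pyGetD (PySem.List.pyGetD dm v []) j 0
-- float('inf') is modelled as `none : Option Int`; exact here since every weight compared to it is an Int
def wlt : Option Int → Option Int → Bool
  | some a, some b => decide (a < b)
  | some _, none => true
  | none, _ => false
-- Python's `<` on the tuples (weight, idx): lexicographic
def tupLt (p q : Option Int × Int) : Bool := wlt p.1 q.1 || (p.1 == q.1 && decide (p.2 < q.2))
-- Python min() over the candidate tuples: first lexicographic minimum of a nonempty list
-- ([] is unreachable under Pre_: Python min raises ValueError there)
def pyMinTup : List (Option Int × Int) → Option Int × Int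
  | [] => (none, -1)
  | h :: t => t.foldl (fun best c => if tupLt c best then c else best) h

def minimum_spanning_tree (dm : List (List Int)) : List (Int × Int) :=
  let n : Int := PySem.List.len dm
  let selected := List.replicate n.toNat false
  let min_edge : List (Option Int × Int) := List.replicate n.toNat (none, -1)
  let min_edge := PySem.List.pySetD min_edge 0 (some 0, -1)
  let st := (PySem.List.pyRange 0 n 1).foldl (fun st _ =>
    match st with
    | (sel, me, mst) =>
      let v := (pyMinTup (((PySem.List.enumerate me).filter
                 (fun p => !vget sel p.1)).map (fun p => (p.2.1, p.1)))).2
      let sel := vset sel v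
      let mst := if (PySem.List.pyGetD me v (none, -1)).2 ≠ -1
                 then mst ++ [(v, (PySem.List.pyGetD me v (none, -1)).2)] else mst
      let me := (PySem.List.pyRange 0 n 1).foldl (fun me j =>
          if wlt (some (dget dm v j)) (PySem.List.pyGetD me j (none, -1)).1
          then PySem.List.pySetD me j (some (dget dm v j), v) else me) me
      (sel, me, mst)) (selected, min_edge, ([] : List (Int × Int)))
  st.2.2

-- identical helper code in both Pythons (adjacency_list / root), shared:
def adjacency_list (mst : List (Int × Int)) : PySem.Dict Int (List Int) :=
  mst.foldl (fun d p => (d.modify p.1 [] (· ++ [p.2])).modify p.2 [] (· ++ [p.1])) PySem.Dict.empty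
def rootNodes (tree : PySem.Dict Int (List Int)) : List Int :=
  (tree.items.filter (fun p => p.2.length == 1)).map (·.1)

-- A's recursive dfs; the mutation of tour/visited is threaded as state. fuel only forces
-- termination (each visit consumes one unit; the call sites pass n+1, which is never exhausted)
mutual
def dfsA (fuel : Nat) (node : Int) (tree : PySem.Dict Int (List Int))
    (tour : List Int) (visited : List Bool) : List Int × List Bool :=
  match fuel with
  | 0 => (tour, visited)
  | f + 1 =>
    let visited := vset visited node
    let tour := tour ++ [node]
    dfsAGo f (tree.getD node []) tree tour visited   -- tree[node]: node is always a key here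
termination_by (fuel, 0)
def dfsAGo (fuel : Nat) (nbs : List Int) (tree : PySem.Dict Int (List Int))
    (tour : List Int) (visited : List Bool) : List Int × List Bool :=
  match nbs with
  | [] => (tour, visited)
  | nb :: rest =>
    if vget visited nb then dfsAGo fuel rest tree tour visited
    else
      let r := dfsA fuel nb tree tour visited
      dfsAGo fuel rest tree r.1 r.2
termination_by (fuel, nbs.length + 1)
end

-- int(...) in tour_cost is the identity on the Int entries
def tour_cost (tour : List Int) (dm : List (List Int)) : Int :=
  ((PySem.List.pyRange 0 (PySem.List.len tour) 1).map (fun i =>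
     dget dm (PySem.List.pyGetD tour i 0)
             (PySem.List.pyGetD tour (PySem.Int.mod (i + 1) (PySem.List.len tour)) 0))).sum

def construct_tour (distance_matrix : List (List Int)) : List Int :=
  let mst := minimum_spanning_tree distance_matrix
  -- A's `sorted(mst, key=…)` discards its result: a pure no-op, kept for fidelity
  let _ := PySem.List.sorted mst (fun x => dget distance_matrix x.1 x.2) false
  let tree := adjacency_list mst
  let root_nodes := rootNodes tree
  let n : Int := PySem.List.len distance_matrix
  let best_tour := PySem.List.pyRange 0 n 1
  root_nodes.foldl (fun best node =>
    let visited := List.replicate n.toNat false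
    let r := dfsA (n.toNat + 1) node tree [] visited
    if tour_cost r.1 distance_matrix < tour_cost best distance_matrix then r.1 else best) best_tour

-- ===== PORT B =====
def maxDeg (adj : PySem.Dict Int (List Int)) : Nat :=
  (adj.values.map List.length).foldl max 0

theorem pv_foldl_cons_length {α : Type} (l acc : List α) :
    (l.foldl (fun st x => x :: st) acc).length = l.length + acc.length := by
  induction l generalizing acc with
  | nil => simp
  | cons x t ih => simp [List.foldl_cons, ih]; omega

theorem pv_getD_le_maxDeg (adj : PySem.Dict Int (List Int)) (x : Int) :
    (adj.getD x []).length ≤ maxDeg adj := by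
  rw [PySem.Dict.getD_eq_get?_getD]
  cases h : adj.get? x with
  | none => simp [maxDeg]
  | some l =>
    have hv : l ∈ adj.values := by
      have := PySem.Dict.mem_items_of_get?_eq_some (d := adj) h
      simpa [PySem.Dict.values] using List.mem_map_of_mem (f := Prod.snd) this
    have := (PySem.List.le_foldl_max_nat (adj.values.map List.length) id 0).2
    simpa [maxDeg, List.foldl_map] using this l.length (List.mem_map_of_mem hv)

theorem pv_countF_vset_lt (visited : List Bool) (x : Int) (h : vget visited x = false) :
    (vset visited x).count false < visited.count false := by
  unfold vget at h
  unfold vset PySem.List.pySetD PySem.List.pySet?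
  cases hidx : PySem.List.pyIdx? visited.length x with
  | none => simp [PySem.List.pyGet?, hidx] at h
  | some k =>
    have hk : visited[k]? = some false := by
      simp [PySem.List.pyGet?, hidx] at h
      cases hg : visited[k]? with
      | none => simp [hg] at h
      | some b => simp [hg] at h; simp [h]
    have hklt : k < visited.length := by
      by_contra hge
      simp [List.getElem?_eq_none (le_of_not_gt hge)] at hk
    simp only [hidx, Option.map_some, Option.getD_some]
    have hkv : visited[k] = false := by
      have := List.getElem?_eq_getElem hklt (l := visited)
      rw [this] at hk; exact Option.some.inj hk
    clear hidx h hk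
    induction visited generalizing k with
    | nil => simp at hklt
    | cons b t ih =>
      cases k with
      | zero =>
        have hb : b = false := by simpa using hkv
        subst hb
        simp [List.count_cons]
      | succ k =>
        have := ih k (by simpa using hklt) (by simpa using hkv)
        simp only [List.set_cons_succ, List.count_cons]
        omega

def dfsB (adj : PySem.Dict Int (List Int)) (stack : List Int)
    (tour : List Int) (visited : List Bool) : List Int :=
  match stack with
  | [] => tour
  | x :: rest =>
    if vget visited x then dfsB adj rest tour visited
    else
      let visited' := vset visited x
      let tour' := tour ++ [x]
      -- for nb in reversed(adj[x]): if not visited[nb]: stack.append(nb)   (top of stack = list head)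
      let pushed := ((adj.getD x []).reverse.filter (fun nb => !vget visited' nb)).foldl
                      (fun st nb => nb :: st) rest
      dfsB adj pushed tour' visited'
termination_by stack.length + (maxDeg adj + 1) * visited.count false
decreasing_by
  · simp
  · rename_i hvx
    have h1 := pv_foldl_cons_length (((adj.getD x []).reverse.filter (fun nb => !vget (vset visited x) nb))) rest
    have h2 : ((adj.getD x []).reverse.filter (fun nb => !vget (vset visited x) nb)).length ≤ maxDeg adj :=
      le_trans (le_trans (List.length_filter_le _ _) (by simp)) (pv_getD_le_maxDeg adj x)
    have h3 := pv_countF_vset_lt visited x (by simpa using hvx)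
    have h4 : (maxDeg adj + 1) * List.count false (vset visited x) + (maxDeg adj + 1)
        ≤ (maxDeg adj + 1) * List.count false visited := by
      have := Nat.mul_le_mul_left (maxDeg adj + 1)
        (show List.count false (vset visited x) + 1 ≤ List.count false visited by omega)
      simpa [Nat.mul_add] using this
    simp only [h1]
    simp only [List.length_cons]
    omega

def stackTour (adj : PySem.Dict Int (List Int)) (r : Int) (n : Int) : List Int :=
  dfsB adj [r] [] (List.replicate n.toNat false)

def costB (t : List Int) (dm : List (List Int)) : Int :=
  ((PySem.List.pyRange 0 (PySem.List.len t) 1).map (fun i =>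
     dget dm (PySem.List.pyGetD t (i - 1) 0) (PySem.List.pyGetD t i 0))).sum

def primB (distance_matrix : List (List Int)) : List (Int × Int) :=
  let n : Int := PySem.List.len distance_matrix
  let key0 := PySem.List.pySetD (List.replicate n.toNat (none : Option Int)) 0 (some 0)
  let parent0 : List Int := List.replicate n.toNat (-1)
  let intree0 := List.replicate n.toNat false
  let st := (PySem.List.pyRange 0 n 1).foldl (fun st _ =>
    match st with
    | (key, parent, intree, mst) =>
      let v := (PySem.List.pyRange 0 n 1).foldl (fun v u =>
        if !vget intree u && (v == -1 || wlt (PySem.List.pyGetD key u none)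
                                             (PySem.List.pyGetD key v none))
        then u else v) (-1)
      let intree := vset intree v
      let mst := if PySem.List.pyGetD parent v (-1) ≠ -1
                 then mst ++ [(v, PySem.List.pyGetD parent v (-1))] else mst
      let row := PySem.List.pyGetD distance_matrix v []
      let kp := (PySem.List.pyRange 0 n 1).foldl (fun kp u =>
        if wlt (some (PySem.List.pyGetD row u 0)) (PySem.List.pyGetD kp.1 u none)
        then (PySem.List.pySetD kp.1 u (some (PySem.List.pyGetD row u 0)),
              PySem.List.pySetD kp.2 u v)
        else kp) (key, parent)
      (kp.1, kp.2, intree, mst)) (key0, parent0, intree0, ([] : List (Int × Int)))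
  st.2.2.2

def construct_tour_alt (distance_matrix : List (List Int)) : List Int :=
  let n : Int := PySem.List.len distance_matrix
  let adj := adjacency_list (primB distance_matrix)
  let cands := PySem.List.pyRange 0 n 1 :: (rootNodes adj).map (fun r => stackTour adj r n)
  (PySem.List.min? cands (fun t => costB t distance_matrix)).getD []

-- ===== PRECONDITION & SPEC =====
-- A raises IndexError on the empty matrix (the assignment min_edge[0]) and whenever some row is
-- shorter than the number n of rows (distance_matrix[v][to] is read for every v, to < n);
-- Pre_ excludes exactly those inputs. Extra columns beyond n are never read and stay admitted.
def Pre_construct_tour (distance_matrix : List (List Int)) : Prop :=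
  distance_matrix ≠ [] ∧ ∀ row ∈ distance_matrix, distance_matrix.length ≤ row.length
instance (distance_matrix : List (List Int)) : Decidable (Pre_construct_tour distance_matrix) := by
  unfold Pre_construct_tour; infer_instance

def pvWitness_construct_tour : List (List Int) := [[0, 2, 9], [2, 0, 4], [9, 4, 0]]

def Spec_construct_tour (distance_matrix : List (List Int)) (out : List Int) : Prop := out = construct_tour_alt distance_matrix
instance (distance_matrix : List (List Int)) (out : List Int) : Decidable (Spec_construct_tour distance_matrix out) := by unfold Spec_construct_tour; infer_instance

-- ===== CLAIM (what is proved, stated in full; the proofs are below) =====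
def Claim_equal_construct_tour : Prop := ∀ (distance_matrix : List (List Int)), Dom_construct_tour distance_matrix → Pre_construct_tour distance_matrix → Spec_construct_tour distance_matrix (construct_tour distance_matrix)

-- ===== LEMMAS AND PROOFS =====

-- ---------- generic list facts ----------
theorem pv_foldl_cons_rev {α : Type} (l acc : List α) :
    l.foldl (fun st x => x :: st) acc = l.reverse ++ acc := by
  induction l generalizing acc with
  | nil => simp
  | cons x t ih => simp [List.foldl_cons, ih]

theorem pv_pushed_eq {α : Type} (l acc : List α) (p : α → Bool) :
    (l.reverse.filter p).foldl (fun st x => x :: st) acc = l.filter p ++ acc := by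
  rw [pv_foldl_cons_rev, ← List.filter_reverse, List.reverse_reverse]

theorem pv_set_zip {α β : Type} (l₁ : List α) (l₂ : List β) (k : Nat) (a : α) (b : β) :
    (l₁.zip l₂).set k (a, b) = (l₁.set k a).zip (l₂.set k b) := by
  induction l₁ generalizing l₂ k with
  | nil => simp
  | cons x t ih =>
    cases l₂ with
    | nil => simp
    | cons y u =>
      cases k with
      | zero => simp
      | succ k => simp [List.zip_cons_cons, ih]

theorem pv_zip_pySetD {α β : Type} (l₁ : List α) (l₂ : List β) (i : Int) (a : α) (b : β)
    (h : l₁.length = l₂.length) :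
    PySem.List.pySetD (l₁.zip l₂) i (a, b) = (PySem.List.pySetD l₁ i a).zip (PySem.List.pySetD l₂ i b) := by
  unfold PySem.List.pySetD PySem.List.pySet?
  have hz : (l₁.zip l₂).length = l₁.length := by simp [h]
  have e0 : PySem.List.pyIdx? (min l₁.length l₂.length) i = PySem.List.pyIdx? l₁.length i := by
    rw [h, Nat.min_self]
  have e2 : PySem.List.pyIdx? l₂.length i = PySem.List.pyIdx? l₁.length i := by rw [h]
  cases hidx : PySem.List.pyIdx? l₁.length i with
  | none => simp [e0, e2, hidx]
  | some k => simp [e0, e2, hidx, pv_set_zip]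

theorem pv_count_true_set (l : List Bool) (j : Nat) (hj : j < l.length) (hv : l[j] = false) :
    (l.set j true).count true = l.count true + 1 := by
  induction l generalizing j with
  | nil => simp at hj
  | cons b t ih =>
    cases j with
    | zero =>
      have hb : b = false := by simpa using hv
      subst hb; simp [List.count_cons]
    | succ j =>
      have := ih j (by simpa using hj) (by simpa using hv)
      simp only [List.set_cons_succ, List.count_cons]
      omega

theorem pv_vget_nonneg (l : List Bool) (i : Int) (h0 : 0 ≤ i) (hi : i < l.length) :
    vget l i = l[i.toNat]'(by omega) := by
  unfold vget
  rw [PySem.List.pyGet?_of_nonneg _ h0, List.getElem?_eq_getElem (by omega)]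
  rfl

theorem pv_vget_repl (n : Nat) (i : Int) (h0 : 0 ≤ i) (hi : i < n) :
    vget (List.replicate n false) i = false := by
  rw [pv_vget_nonneg _ _ h0 (by simpa using hi)]
  simp

theorem pv_vset_nonneg (l : List Bool) (i : Int) (h0 : 0 ≤ i) :
    vset l i = l.set i.toNat true := by
  unfold vset
  exact PySem.List.pySetD_of_nonneg _ _ h0

theorem pv_pyGetD_cons_pos {α : Type} (x : α) (t : List α) (i : Int) (d : α) (h : 1 ≤ i) :
    PySem.List.pyGetD (x :: t) i d = PySem.List.pyGetD t (i - 1) d := by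
  unfold PySem.List.pyGetD PySem.List.pyGet? PySem.List.pyIdx?
  have h0 : 0 ≤ i := by omega
  have h1 : 0 ≤ i - 1 := by omega
  simp only [if_pos h0, if_pos h1, List.length_cons]
  by_cases hlt : i - 1 < (t.length : Int)
  · have hlt' : i < (t.length : Int) + 1 := by omega
    rw [if_pos (by exact_mod_cast hlt'), if_pos hlt]
    have heq : i.toNat = (i - 1).toNat + 1 := by omega
    rw [heq]
    simp
  · rw [if_neg (by push_cast; omega), if_neg hlt]
    simp

-- ---------- enumerate ----------
theorem pv_enum_nil {α : Type} (s : Int) : PySem.List.enumerate ([] : List α) s = [] := rfl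
theorem pv_enum_cons {α : Type} (x : α) (t : List α) (s : Int) :
    PySem.List.enumerate (x :: t) s = (s, x) :: PySem.List.enumerate t (s + 1) := rfl

theorem pv_enum_mem {α : Type} (d : α) :
    ∀ (xs : List α) (s : Int) (p : Int × α), p ∈ PySem.List.enumerate xs s →
      s ≤ p.1 ∧ p.1 < s + xs.length ∧ PySem.List.pyGetD xs (p.1 - s) d = p.2 := by
  intro xs
  induction xs with
  | nil => intro s p hp; rw [pv_enum_nil] at hp; simp at hp
  | cons x t ih =>
    intro s p hp
    rw [pv_enum_cons] at hp
    rcases List.mem_cons.mp hp with hp | hp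
    · subst hp
      refine ⟨le_refl _, by simp only [List.length_cons]; push_cast; omega, ?_⟩
      simp [PySem.List.pyGetD_zero_cons]
    · obtain ⟨h1, h2, h3⟩ := ih (s + 1) p hp
      refine ⟨by omega, by simp only [List.length_cons] at *; push_cast at h2 ⊢; omega, ?_⟩
      rw [pv_pyGetD_cons_pos _ _ _ _ (by omega)]
      rw [show p.1 - s - 1 = p.1 - (s + 1) by ring]
      exact h3

theorem pv_enum_fst {α : Type} :
    ∀ (xs : List α) (s : Int), (PySem.List.enumerate xs s).map (·.1) = PySem.List.pyRange s (s + xs.length) 1 := by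
  intro xs
  induction xs with
  | nil => intro s; rw [pv_enum_nil]; simp [PySem.List.pyRange_one_eq_nil]
  | cons x t ih =>
    intro s
    rw [pv_enum_cons, List.map_cons, ih (s + 1)]
    conv_rhs => rw [PySem.List.pyRange_one_cons (by simp only [List.length_cons]; push_cast; omega)]
    congr 2
    simp only [List.length_cons]
    push_cast
    ring

theorem pv_enum_pairwise {α : Type} (xs : List α) (s : Int) :
    (PySem.List.enumerate xs s).Pairwise (fun p q => p.1 < q.1) := by
  have h := PySem.List.pairwise_lt_pyRange_one s (s + xs.length)
  rw [← pv_enum_fst xs s, List.pairwise_map] at h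
  exact h

-- ---------- Python min as a fold ----------
def minStep (b : Option (Option Int × Int)) (c : Option Int × Int) : Option (Option Int × Int) :=
  match b with
  | none => some c
  | some m => if tupLt c m then some c else some m

theorem pv_minAcc_some : ∀ (t : List (Option Int × Int)) (m : Option Int × Int),
    t.foldl minStep (some m) = some (t.foldl (fun best c => if tupLt c best then c else best) m) := by
  intro t
  induction t with
  | nil => intro m; rfl
  | cons c t ih =>
    intro m
    simp only [List.foldl_cons]
    rw [show minStep (some m) c = some (if tupLt c m then c else m) by cases htl : tupLt c m <;> simp [minStep, htl]]
    rw [ih]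

theorem pv_pyMinTup_eq (l : List (Option Int × Int)) (h : l ≠ []) :
    some (pyMinTup l) = l.foldl minStep none := by
  cases l with
  | nil => simp at h
  | cons c t =>
    simp only [List.foldl_cons, pyMinTup]
    rw [show minStep none c = some c by simp [minStep], pv_minAcc_some]


-- ---------- selection scan ≡ tuple-min ----------
theorem pv_pyIdx_lt (n : Nat) (i : Int) (k : Nat) (h : PySem.List.pyIdx? n i = some k) : k < n := by
  unfold PySem.List.pyIdx? at h
  split_ifs at h with h1 h2 h3 <;> simp_all <;> omega

theorem pv_zip_getD_fst {α β : Type} (l₁ : List α) (l₂ : List β) (i : Int) (d₁ : α) (d₂ : β)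
    (h : l₁.length = l₂.length) :
    (PySem.List.pyGetD (l₁.zip l₂) i (d₁, d₂)).1 = PySem.List.pyGetD l₁ i d₁ := by
  unfold PySem.List.pyGetD PySem.List.pyGet?
  have hz : (l₁.zip l₂).length = l₁.length := by simp [h]
  rw [hz]
  cases hidx : PySem.List.pyIdx? l₁.length i with
  | none => simp
  | some k =>
    have hk := pv_pyIdx_lt _ _ _ hidx
    simp [List.getElem?_eq_getElem, hk, show k < l₂.length by omega,
          show k < (l₁.zip l₂).length by simp [h]; omega, List.getElem_zip]

theorem pv_zip_getD_snd {α β : Type} (l₁ : List α) (l₂ : List β) (i : Int) (d₁ : α) (d₂ : β)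
    (h : l₁.length = l₂.length) :
    (PySem.List.pyGetD (l₁.zip l₂) i (d₁, d₂)).2 = PySem.List.pyGetD l₂ i d₂ := by
  unfold PySem.List.pyGetD PySem.List.pyGet?
  have hz : (l₁.zip l₂).length = l₁.length := by simp [h]
  rw [hz, h]
  cases hidx : PySem.List.pyIdx? l₂.length i with
  | none => simp
  | some k =>
    have hk := pv_pyIdx_lt _ _ _ hidx
    simp [List.getElem?_eq_getElem, hk, show k < l₁.length by omega,
          show k < (l₁.zip l₂).length by simp [h]; omega, List.getElem_zip]

theorem pv_minStep_none (c : Option Int × Int) : minStep none c = some c := rfl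
theorem pv_minStep_some (m c : Option Int × Int) :
    minStep (some m) c = if tupLt c m then some c else some m := by
  cases htl : tupLt c m <;> simp [minStep, htl]

theorem pv_selRel (N : Nat) (sel : List Bool) (key : List (Option Int)) :
    ∀ (l : List (Int × (Option Int × Int))) (v : Int) (b : Option (Option Int × Int)),
    (∀ p ∈ l, 0 ≤ p.1 ∧ p.1 < (N : Int) ∧ p.2.1 = PySem.List.pyGetD key p.1 none) →
    l.Pairwise (fun p q => p.1 < q.1) →
    ((v = -1 ∧ b = none) ∨
      (0 ≤ v ∧ v < (N : Int) ∧ vget sel v = false ∧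
        b = some (PySem.List.pyGetD key v none, v) ∧ ∀ p ∈ l, v < p.1)) →
    ((l.foldl (fun v p => if !vget sel p.1 && (v == -1 || wlt (PySem.List.pyGetD key p.1 none) (PySem.List.pyGetD key v none)) then p.1 else v) v = v ∧
      l.foldl (fun b p => if !vget sel p.1 then minStep b (p.2.1, p.1) else b) b = b ∧
      (∀ p ∈ l, vget sel p.1 = true)) ∨
     (0 ≤ l.foldl (fun v p => if !vget sel p.1 && (v == -1 || wlt (PySem.List.pyGetD key p.1 none) (PySem.List.pyGetD key v none)) then p.1 else v) v ∧
      l.foldl (fun v p => if !vget sel p.1 && (v == -1 || wlt (PySem.List.pyGetD key p.1 none) (PySem.List.pyGetD key v none)) then p.1 else v) v < (N : Int) ∧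
      vget sel (l.foldl (fun v p => if !vget sel p.1 && (v == -1 || wlt (PySem.List.pyGetD key p.1 none) (PySem.List.pyGetD key v none)) then p.1 else v) v) = false ∧
      l.foldl (fun b p => if !vget sel p.1 then minStep b (p.2.1, p.1) else b) b =
        some (PySem.List.pyGetD key (l.foldl (fun v p => if !vget sel p.1 && (v == -1 || wlt (PySem.List.pyGetD key p.1 none) (PySem.List.pyGetD key v none)) then p.1 else v) v) none,
              l.foldl (fun v p => if !vget sel p.1 && (v == -1 || wlt (PySem.List.pyGetD key p.1 none) (PySem.List.pyGetD key v none)) then p.1 else v) v))) := by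
  intro l
  induction l with
  | nil =>
    intro v b _ _ hacc
    rcases hacc with ⟨hv, hb⟩ | ⟨h0, h1, h2, hb, _⟩
    · exact Or.inl ⟨rfl, rfl, by simp⟩
    · exact Or.inr ⟨h0, h1, h2, hb⟩
  | cons p t ih =>
    intro v b hmem hpw hacc
    obtain ⟨hp0, hp1, hpk⟩ := hmem p (List.mem_cons_self ..)
    have hmem' : ∀ q ∈ t, 0 ≤ q.1 ∧ q.1 < (N : Int) ∧ q.2.1 = PySem.List.pyGetD key q.1 none :=
      fun q hq => hmem q (List.mem_cons_of_mem _ hq)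
    have hpw' := (List.pairwise_cons.mp hpw).2
    have hpgt := (List.pairwise_cons.mp hpw).1
    simp only [List.foldl_cons]
    by_cases hs : vget sel p.1
    · rw [if_neg (by simp [hs]), if_neg (by simp [hs])]
      have := ih v b hmem' hpw' (by
        rcases hacc with h | ⟨h0, h1, h2, hb, hgt⟩
        · exact Or.inl h
        · exact Or.inr ⟨h0, h1, h2, hb, fun q hq => hgt q (List.mem_cons_of_mem _ hq)⟩)
      rcases this with ⟨e1, e2, e3⟩ | hr
      · exact Or.inl ⟨e1, e2, fun q hq => by
          rcases List.mem_cons.mp hq with rfl | hq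
          · exact hs
          · exact e3 q hq⟩
      · exact Or.inr hr
    · replace hs : vget sel p.1 = false := by simpa using hs
      rcases hacc with ⟨hv, hb⟩ | ⟨h0, h1, h2, hb, hgt⟩
      · subst hv; subst hb
        rw [if_pos (by simp [hs]), pv_minStep_none, if_pos (by simp [hs])]
        have hres := ih p.1 (some (p.2.1, p.1)) hmem' hpw'
          (Or.inr ⟨hp0, hp1, hs, by rw [hpk], hpgt⟩)
        rcases hres with ⟨e1, e2, _⟩ | hr
        · rw [e1, e2]
          exact Or.inr ⟨hp0, hp1, hs, by rw [hpk]⟩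
        · exact Or.inr hr
      · have hvne : (v == -1) = false := by simp; omega
        have hlt : decide (p.1 < v) = false := by
          simp only [decide_eq_false_iff_not]
          have := hgt p (List.mem_cons_self ..)
          omega
        subst hb
        rw [pv_minStep_some]
        have htup : tupLt (p.2.1, p.1) (PySem.List.pyGetD key v none, v)
            = wlt (PySem.List.pyGetD key p.1 none) (PySem.List.pyGetD key v none) := by
          simp [tupLt, hlt, hpk]
        rw [htup]
        cases hw : wlt (PySem.List.pyGetD key p.1 none) (PySem.List.pyGetD key v none) with
        | true =>
          simp only [hw, hpk, hs, hvne, Bool.or_true, Bool.not_false, Bool.true_and,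
            Bool.and_true, eq_self_iff_true, if_true]
          have hres := ih p.1 (some (PySem.List.pyGetD key p.1 none, p.1)) hmem' hpw'
            (Or.inr ⟨hp0, hp1, hs, rfl, hpgt⟩)
          rcases hres with ⟨e1, e2, _⟩ | hr
          · rw [e1, e2]
            exact Or.inr ⟨hp0, hp1, hs, rfl⟩
          · exact Or.inr hr
        | false =>
          simp only [hw, hvne, hs, Bool.or_false, Bool.and_false, Bool.not_false,
            Bool.true_and, Bool.false_eq_true, if_false, ite_self]
          have hres := ih v (some (PySem.List.pyGetD key v none, v)) hmem' hpw'
            (Or.inr ⟨h0, h1, h2, rfl, fun q hq => hgt q (List.mem_cons_of_mem _ hq)⟩)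
          rcases hres with ⟨e1, e2, _⟩ | hr
          · rw [e1, e2]
            exact Or.inr ⟨h0, h1, h2, rfl⟩
          · exact Or.inr hr

theorem pv_exists_false :
    ∀ (l : List Bool), l.count true < l.length → ∃ j, ∃ (hj : j < l.length), l[j] = false := by
  intro l
  induction l with
  | nil => intro h; simp at h
  | cons b t ih =>
    intro h
    cases b with
    | false => exact ⟨0, by simp, by simp⟩
    | true =>
      have : t.count true < t.length := by simpa [List.count_cons] using h
      obtain ⟨j, hj, hv⟩ := ih this
      exact ⟨j + 1, by simpa using hj, by simpa using hv⟩

theorem pv_enum_mem_of_lt {α : Type} :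
    ∀ (xs : List α) (s : Int) (j : Nat) (hj : j < xs.length), (s + j, xs[j]) ∈ PySem.List.enumerate xs s := by
  intro xs
  induction xs with
  | nil => intro s j hj; simp at hj
  | cons x t ih =>
    intro s j hj
    rw [pv_enum_cons]
    cases j with
    | zero => simp
    | succ j =>
      have := ih (s + 1) j (by simpa using hj)
      right
      simpa [add_comm, add_assoc, add_left_comm] using this


theorem pv_sel_eq (N : Nat) (sel : List Bool) (key : List (Option Int)) (par : List Int)
    (hsl : sel.length = N) (hkl : key.length = N) (hpl : par.length = N)
    (hcnt : sel.count true < N) :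
    (pyMinTup (((PySem.List.enumerate (key.zip par)).filter (fun p => !vget sel p.1)).map (fun p => (p.2.1, p.1)))).2
      = (PySem.List.pyRange 0 (N : Int) 1).foldl (fun v u => if !vget sel u && (v == -1 || wlt (PySem.List.pyGetD key u none) (PySem.List.pyGetD key v none)) then u else v) (-1)
    ∧ 0 ≤ (PySem.List.pyRange 0 (N : Int) 1).foldl (fun v u => if !vget sel u && (v == -1 || wlt (PySem.List.pyGetD key u none) (PySem.List.pyGetD key v none)) then u else v) (-1)
    ∧ (PySem.List.pyRange 0 (N : Int) 1).foldl (fun v u => if !vget sel u && (v == -1 || wlt (PySem.List.pyGetD key u none) (PySem.List.pyGetD key v none)) then u else v) (-1) < (N : Int)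
    ∧ vget sel ((PySem.List.pyRange 0 (N : Int) 1).foldl (fun v u => if !vget sel u && (v == -1 || wlt (PySem.List.pyGetD key u none) (PySem.List.pyGetD key v none)) then u else v) (-1)) = false := by
  have hkp : key.length = par.length := hkl.trans hpl.symm
  have hzlen : (key.zip par).length = N := by simp [hkl, hpl]
  have hmem : ∀ p ∈ PySem.List.enumerate (key.zip par),
      0 ≤ p.1 ∧ p.1 < (N : Int) ∧ p.2.1 = PySem.List.pyGetD key p.1 none := by
    intro p hp
    obtain ⟨h1, h2, h3⟩ := pv_enum_mem ((none : Option Int), (-1 : Int)) (key.zip par) 0 p hp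
    refine ⟨by omega, by rw [hzlen] at h2; omega, ?_⟩
    rw [show p.1 - 0 = p.1 by ring] at h3
    rw [← h3, pv_zip_getD_fst _ _ _ _ _ hkp]
  have hpw := pv_enum_pairwise (key.zip par) 0
  have hrange : PySem.List.pyRange 0 (N : Int) 1 = (PySem.List.enumerate (key.zip par)).map (·.1) := by
    rw [pv_enum_fst, hzlen, zero_add]
  rw [hrange, List.foldl_map]
  have hsel := pv_selRel N sel key (PySem.List.enumerate (key.zip par)) (-1) none hmem hpw
    (Or.inl ⟨rfl, rfl⟩)
  rcases hsel with ⟨_, _, e3⟩ | ⟨r0, r1, r2, r4⟩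
  · exfalso
    obtain ⟨j, hj, hjf⟩ := pv_exists_false sel (by rw [hsl]; exact hcnt)
    have hjz : j < (key.zip par).length := by rw [hzlen, ← hsl]; exact hj
    have hpmem := pv_enum_mem_of_lt (key.zip par) 0 j hjz
    have := e3 _ hpmem
    rw [show ((0 : Int) + (j : Int), (key.zip par)[j]).1 = (j : Int) by simp] at this
    rw [pv_vget_nonneg sel (j : Int) (by omega) (by rw [hsl, ← hsl] at *; exact_mod_cast hj)] at this
    simp at this
    rw [this] at hjf
    simp at hjf
  · refine ⟨?_, r0, r1, r2⟩
    have hAeq : (((PySem.List.enumerate (key.zip par)).filter (fun p => !vget sel p.1)).map (fun p => (p.2.1, p.1))).foldl minStep none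
        = (PySem.List.enumerate (key.zip par)).foldl (fun b p => if !vget sel p.1 then minStep b (p.2.1, p.1) else b) none := by
      rw [List.foldl_map, ← PySem.List.foldl_if_eq_foldl_filter]
    have hne : (((PySem.List.enumerate (key.zip par)).filter (fun p => !vget sel p.1)).map (fun p => (p.2.1, p.1))) ≠ [] := by
      intro hnil
      rw [hnil] at hAeq
      simp only [List.foldl_nil] at hAeq
      rw [← hAeq] at r4
      simp at r4
    have hmin := pv_pyMinTup_eq _ hne
    rw [hAeq, r4] at hmin
    rw [Option.some.inj hmin]

-- ---------- the min_edge update loop ----------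
theorem pv_upd (dm : List (List Int)) (v : Int) :
    ∀ (idxs : List Int) (key : List (Option Int)) (par : List Int), key.length = par.length →
      (idxs.foldl (fun me j => if wlt (some (PySem.List.pyGetD (PySem.List.pyGetD dm v []) j 0)) (PySem.List.pyGetD me j ((none : Option Int), (-1 : Int))).1
          then PySem.List.pySetD me j (some (PySem.List.pyGetD (PySem.List.pyGetD dm v []) j 0), v) else me) (key.zip par)
        = (idxs.foldl (fun kp u => if wlt (some (PySem.List.pyGetD (PySem.List.pyGetD dm v []) u 0)) (PySem.List.pyGetD kp.1 u none)
            then (PySem.List.pySetD kp.1 u (some (PySem.List.pyGetD (PySem.List.pyGetD dm v []) u 0)), PySem.List.pySetD kp.2 u v)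
            else kp) (key, par)).1.zip
          (idxs.foldl (fun kp u => if wlt (some (PySem.List.pyGetD (PySem.List.pyGetD dm v []) u 0)) (PySem.List.pyGetD kp.1 u none)
            then (PySem.List.pySetD kp.1 u (some (PySem.List.pyGetD (PySem.List.pyGetD dm v []) u 0)), PySem.List.pySetD kp.2 u v)
            else kp) (key, par)).2)
      ∧ (idxs.foldl (fun kp u => if wlt (some (PySem.List.pyGetD (PySem.List.pyGetD dm v []) u 0)) (PySem.List.pyGetD kp.1 u none)
            then (PySem.List.pySetD kp.1 u (some (PySem.List.pyGetD (PySem.List.pyGetD dm v []) u 0)), PySem.List.pySetD kp.2 u v)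
            else kp) (key, par)).1.length = key.length
      ∧ (idxs.foldl (fun kp u => if wlt (some (PySem.List.pyGetD (PySem.List.pyGetD dm v []) u 0)) (PySem.List.pyGetD kp.1 u none)
            then (PySem.List.pySetD kp.1 u (some (PySem.List.pyGetD (PySem.List.pyGetD dm v []) u 0)), PySem.List.pySetD kp.2 u v)
            else kp) (key, par)).2.length = par.length
      ∧ (∀ x ∈ (idxs.foldl (fun kp u => if wlt (some (PySem.List.pyGetD (PySem.List.pyGetD dm v []) u 0)) (PySem.List.pyGetD kp.1 u none)
            then (PySem.List.pySetD kp.1 u (some (PySem.List.pyGetD (PySem.List.pyGetD dm v []) u 0)), PySem.List.pySetD kp.2 u v)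
            else kp) (key, par)).2, x ∈ par ∨ x = v) := by
  intro idxs
  induction idxs with
  | nil => intro key par h; exact ⟨rfl, rfl, rfl, fun x hx => Or.inl hx⟩
  | cons j rest ih =>
    intro key par h
    simp only [List.foldl_cons]
    rw [pv_zip_getD_fst _ _ _ _ _ h]
    cases hc : wlt (some (PySem.List.pyGetD (PySem.List.pyGetD dm v []) j 0)) (PySem.List.pyGetD key j none) with
    | false =>
      simp only [Bool.false_eq_true, if_false]
      exact ih key par h
    | true =>
      simp only [if_true]
      rw [pv_zip_pySetD _ _ _ _ _ h]
      have hlen : (PySem.List.pySetD key j (some (PySem.List.pyGetD (PySem.List.pyGetD dm v []) j 0))).length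
          = (PySem.List.pySetD par j v).length := by
        simp [PySem.List.length_pySetD, h]
      obtain ⟨e1, e2, e3, e4⟩ := ih _ _ hlen
      refine ⟨e1, by rw [e2]; simp [PySem.List.length_pySetD], by rw [e3]; simp [PySem.List.length_pySetD], ?_⟩
      intro x hx
      rcases e4 x hx with hx' | hx'
      · unfold PySem.List.pySetD PySem.List.pySet? at hx'
        cases hidx : PySem.List.pyIdx? par.length j with
        | none =>
          rw [hidx] at hx'
          simp only [Option.map_none, Option.getD_none] at hx'
          exact Or.inl hx'
        | some k =>
          rw [hidx] at hx'
          simp only [Option.map_some, Option.getD_some] at hx'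
          rcases List.mem_or_eq_of_mem_set hx' with h' | h'
          · exact Or.inl h'
          · exact Or.inr h' 
      · exact Or.inr hx'

-- ---------- the outer Prim loop ----------
theorem pv_fold2_inv {σA σB : Type} (FA : σA → σA) (FB : σB → σB) (M : Nat) (R : Nat → σA → σB → Prop)
    (hstep : ∀ k a b, k < M → R k a b → R (k + 1) (FA a) (FB b)) :
    ∀ (l : List Int) (k : Nat) (a : σA) (b : σB), k + l.length ≤ M → R k a b →
      R (k + l.length) (l.foldl (fun s _ => FA s) a) (l.foldl (fun s _ => FB s) b) := by
  intro l
  induction l with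
  | nil => intro k a b _ hR; simpa using hR
  | cons x t ih =>
    intro k a b h hR
    simp only [List.foldl_cons, List.length_cons]
    have hlt : k < M := by simp only [List.length_cons] at h; omega
    have := ih (k + 1) (FA a) (FB b) (by simp only [List.length_cons] at h; omega) (hstep k a b hlt hR)
    rw [show k + (t.length + 1) = k + 1 + t.length by omega]
    exact this


def PrimInv (N : Nat) (k : Nat)
    (a : List Bool × List (Option Int × Int) × List (Int × Int))
    (b : List (Option Int) × List Int × List Bool × List (Int × Int)) : Prop :=
  a.1 = b.2.2.1 ∧ a.2.1 = b.1.zip b.2.1 ∧ a.2.2 = b.2.2.2 ∧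
  a.1.length = N ∧ b.1.length = N ∧ b.2.1.length = N ∧
  a.1.count true = k ∧
  (∀ x ∈ b.2.1, x = -1 ∨ (0 ≤ x ∧ x < (N : Int))) ∧
  (∀ e ∈ a.2.2, (0 ≤ e.1 ∧ e.1 < (N : Int)) ∧ (0 ≤ e.2 ∧ e.2 < (N : Int)))

theorem pv_prim_step (dm : List (List Int)) (N : Nat) (hN : dm.length = N)
    (k : Nat) (hk : k < N)
    (a : List Bool × List (Option Int × Int) × List (Int × Int))
    (b : List (Option Int) × List Int × List Bool × List (Int × Int))
    (hR : PrimInv N k a b) :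
    PrimInv N (k + 1)
      ((fun st =>
        match st with
        | (sel, me, mst) =>
          let v := (pyMinTup (((PySem.List.enumerate me).filter
                     (fun p => !vget sel p.1)).map (fun p => (p.2.1, p.1)))).2
          let sel := vset sel v
          let mst := if (PySem.List.pyGetD me v (none, -1)).2 ≠ -1
                     then mst ++ [(v, (PySem.List.pyGetD me v (none, -1)).2)] else mst
          let me := (PySem.List.pyRange 0 (N : Int) 1).foldl (fun me j =>
              if wlt (some (PySem.List.pyGetD (PySem.List.pyGetD dm v []) j 0)) (PySem.List.pyGetD me j (none, -1)).1
              then PySem.List.pySetD me j (some (PySem.List.pyGetD (PySem.List.pyGetD dm v []) j 0), v) else me) me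
          (sel, me, mst)) a)
      ((fun st =>
        match st with
        | (key, parent, intree, mst) =>
          let v := (PySem.List.pyRange 0 (N : Int) 1).foldl (fun v u =>
            if !vget intree u && (v == -1 || wlt (PySem.List.pyGetD key u none)
                                                 (PySem.List.pyGetD key v none))
            then u else v) (-1)
          let intree := vset intree v
          let mst := if PySem.List.pyGetD parent v (-1) ≠ -1
                     then mst ++ [(v, PySem.List.pyGetD parent v (-1))] else mst
          let row := PySem.List.pyGetD dm v []
          let kp := (PySem.List.pyRange 0 (N : Int) 1).foldl (fun kp u =>
            if wlt (some (PySem.List.pyGetD row u 0)) (PySem.List.pyGetD kp.1 u none)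
            then (PySem.List.pySetD kp.1 u (some (PySem.List.pyGetD row u 0)),
                  PySem.List.pySetD kp.2 u v)
            else kp) (key, parent)
          (kp.1, kp.2, intree, mst)) b) := by
  obtain ⟨sel, me, mstA⟩ := a
  obtain ⟨key, par, intree, mstB⟩ := b
  obtain ⟨hsel, hme, hmst, hslen, hklen, hplen, hcount, hpar, hmstok⟩ := hR
  dsimp only at hsel hme hmst hslen hklen hplen hcount hpar hmstok ⊢
  have hkp : key.length = par.length := hklen.trans hplen.symm
  obtain ⟨hAv, r0, r1, r2⟩ := pv_sel_eq N sel key par hslen hklen hplen (by omega)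
  subst hsel
  subst hme
  subst hmst
  rw [hAv]
  set v := (PySem.List.pyRange 0 (N : Int) 1).foldl (fun v u =>
    if !vget sel u && (v == -1 || wlt (PySem.List.pyGetD key u none)
                                       (PySem.List.pyGetD key v none))
    then u else v) (-1) with hvdef
  obtain ⟨e1, e2, e3, e4⟩ := pv_upd dm v (PySem.List.pyRange 0 (N : Int) 1) key par hkp
  refine ⟨rfl, e1, ?_, ?_, ?_, ?_, ?_, ?_, ?_⟩
  · rw [pv_zip_getD_snd _ _ _ _ _ hkp]
  · simp [vset, PySem.List.length_pySetD, hslen]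
  · rw [e2, hklen]
  · rw [e3, hplen]
  · rw [pv_vset_nonneg _ _ r0]
    rw [pv_count_true_set sel v.toNat (by omega) ?_, hcount]
    rw [pv_vget_nonneg sel v r0 (by omega)] at r2
    exact r2
  · intro x hx
    rcases e4 x hx with hx' | hx'
    · exact hpar x hx'
    · subst hx'
      exact Or.inr ⟨r0, r1⟩
  · rw [pv_zip_getD_snd _ _ _ _ _ hkp]
    split_ifs with hprev
    · intro e he
      rcases List.mem_append.mp he with he | he
      · exact hmstok e he
      · have hee : e = (v, PySem.List.pyGetD par v (-1)) := by simpa using he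
        subst hee
        refine ⟨⟨r0, r1⟩, ?_⟩
        have hmem : PySem.List.pyGetD par v (-1) ∈ par :=
          PySem.List.pyGetD_mem par _ (by unfold PySem.Raise.InRange; constructor <;> omega)
        rcases hpar _ hmem with h' | h'
        · exact absurd h' hprev
        · exact h'
    · exact hmstok

theorem pv_prim_eq (dm : List (List Int)) (hPre : Pre_construct_tour dm) :
    minimum_spanning_tree dm = primB dm
    ∧ ∀ e ∈ primB dm, (0 ≤ e.1 ∧ e.1 < (dm.length : Int)) ∧ (0 ≤ e.2 ∧ e.2 < (dm.length : Int)) := by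
  obtain ⟨hne, _⟩ := hPre
  have hN1 : 1 ≤ dm.length := List.length_pos_iff.mpr hne
  unfold minimum_spanning_tree primB
  simp only [PySem.List.len_eq, dget, Int.toNat_natCast]
  have hbase : PrimInv dm.length 0
      (List.replicate dm.length false,
       PySem.List.pySetD (List.replicate dm.length ((none : Option Int), (-1 : Int))) 0 (some 0, -1),
       ([] : List (Int × Int)))
      (PySem.List.pySetD (List.replicate dm.length (none : Option Int)) 0 (some 0),
       List.replicate dm.length (-1 : Int),
       List.replicate dm.length false,
       ([] : List (Int × Int))) := by
    refine ⟨rfl, ?_, rfl, by simp, by simp [PySem.List.length_pySetD], by simp, by simp [List.count_replicate], ?_, by simp⟩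
    · rw [show List.replicate dm.length ((none : Option Int), (-1 : Int))
            = (List.replicate dm.length (none : Option Int)).zip (List.replicate dm.length (-1 : Int)) by
          simp [List.zip_replicate]]
      rw [pv_zip_pySetD _ _ _ _ _ (by simp)]
      have hsr : PySem.List.pySetD (List.replicate dm.length (-1 : Int)) 0 (-1) = List.replicate dm.length (-1 : Int) := by
        rw [PySem.List.pySetD_of_nonneg _ _ (by omega)]
        exact List.set_replicate_self
      rw [hsr]
    · intro x hx
      exact Or.inl (List.eq_of_mem_replicate hx)
  have hfold := pv_fold2_inv _ _ dm.length (PrimInv dm.length)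
    (fun k a b hk hR => pv_prim_step dm dm.length rfl k hk a b hR)
    (PySem.List.pyRange 0 (dm.length : Int) 1) 0 _ _
    (by rw [PySem.List.length_pyRange_one]; omega) hbase
  rw [PySem.List.length_pyRange_one] at hfold
  obtain ⟨_, _, hmst, _, _, _, _, _, hbounds⟩ := hfold
  constructor
  · exact hmst
  · intro e he
    exact hbounds e (by rw [hmst]; exact he)


-- ---------- recursive DFS ≡ stack DFS ----------
inductive PvDel (v : List Bool) : List Int → List Int → Prop
  | nil : PvDel v [] []
  | keep (x : Int) {s₁ s₂ : List Int} : PvDel v s₁ s₂ → PvDel v (x :: s₁) (x :: s₂)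
  | drop (x : Int) {s₁ s₂ : List Int} : vget v x = true → PvDel v s₁ s₂ → PvDel v (x :: s₁) s₂

theorem pv_del_refl (v : List Bool) : ∀ (s : List Int), PvDel v s s := by
  intro s
  induction s with
  | nil => exact PvDel.nil
  | cons x t ih => exact PvDel.keep x ih

theorem pv_vle_vset (vis : List Bool) (x i : Int) (h : vget vis i = true) :
    vget (vset vis x) i = true := by
  unfold vget PySem.List.pyGet? at h ⊢
  rw [show (vset vis x).length = vis.length from by unfold vset; exact PySem.List.length_pySetD ..]
  cases hi : PySem.List.pyIdx? vis.length i with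
  | none => simpa [hi] using h
  | some k =>
    rw [hi] at h
    simp only [Option.bind_some] at h ⊢
    unfold vset PySem.List.pySetD PySem.List.pySet?
    cases hx : PySem.List.pyIdx? vis.length x with
    | none => simpa using h
    | some k' =>
      have hk' := pv_pyIdx_lt _ _ _ hx
      simp only [Option.map_some, Option.getD_some]
      by_cases hkk : k = k'
      · subst hkk
        rw [List.getElem?_set_self (by omega)]
        rfl
      · rw [List.getElem?_set_ne (by omega)]
        exact h

theorem pv_del_mono {vis vis' : List Bool} (hle : ∀ i, vget vis i = true → vget vis' i = true) :
    ∀ {s₁ s₂ : List Int}, PvDel vis s₁ s₂ → PvDel vis' s₁ s₂ := by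
  intro s₁ s₂ h
  induction h with
  | nil => exact PvDel.nil
  | keep x _ ih => exact PvDel.keep x ih
  | drop x hx _ ih => exact PvDel.drop x (hle _ hx) ih

theorem pv_del_append (v : List Bool) (P : List Int) {s₁ s₂ : List Int} (h : PvDel v s₁ s₂) :
    PvDel v (P ++ s₁) (P ++ s₂) := by
  induction P with
  | nil => exact h
  | cons x t ih => exact PvDel.keep x ih

theorem pv_del_filter (v : List Bool) :
    ∀ (a s : List Int), PvDel v (a ++ s) (a.filter (fun y => !vget v y) ++ s) := by
  intro a s
  induction a with
  | nil => exact pv_del_refl v s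
  | cons y t ih =>
    cases hy : vget v y with
    | true => simpa [List.filter_cons, hy] using PvDel.drop y hy ih
    | false => simpa [List.filter_cons, hy] using PvDel.keep y ih

theorem pv_meas (adj : PySem.Dict Int (List Int)) (x : Int) (visited : List Bool)
    (rest P : List Int) (hP : P.length ≤ maxDeg adj) (hx : vget visited x = false) :
    (P ++ rest).length + (maxDeg adj + 1) * (vset visited x).count false
      < (x :: rest).length + (maxDeg adj + 1) * visited.count false := by
  have h3 := pv_countF_vset_lt visited x hx
  have h4 : (maxDeg adj + 1) * ((vset visited x).count false) + (maxDeg adj + 1)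
      ≤ (maxDeg adj + 1) * visited.count false := by
    have := Nat.mul_le_mul_left (maxDeg adj + 1)
      (show (vset visited x).count false + 1 ≤ visited.count false by omega)
    simpa [Nat.mul_add] using this
  simp only [List.length_append, List.length_cons]
  omega

theorem pv_del_dfsB (adj : PySem.Dict Int (List Int)) :
    ∀ (μ : Nat) (visited : List Bool) (s₁ s₂ tour : List Int),
      s₁.length + (maxDeg adj + 1) * visited.count false ≤ μ →
      PvDel visited s₁ s₂ →
      dfsB adj s₁ tour visited = dfsB adj s₂ tour visited := by
  intro μ
  induction μ with
  | zero =>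
    intro visited s₁ s₂ tour hm hdel
    cases hdel with
    | nil => rfl
    | keep x h => exfalso; simp only [List.length_cons] at hm; omega
    | drop x hx h => exfalso; simp only [List.length_cons] at hm; omega
  | succ μ ih =>
    intro visited s₁ s₂ tour hm hdel
    cases hdel with
    | nil => rfl
    | @keep x s₁' s₂' hd =>
      rw [dfsB, dfsB]
      cases hvx : vget visited x with
      | true =>
        simp only [hvx, if_true]
        exact ih visited s₁' s₂' tour (by simp only [List.length_cons] at hm; omega) hd
      | false =>
        simp only [hvx, Bool.false_eq_true, if_false]
        rw [pv_pushed_eq, pv_pushed_eq]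
        have hP : ((adj.getD x []).filter (fun nb => !vget (vset visited x) nb)).length ≤ maxDeg adj :=
          le_trans (List.length_filter_le _ _) (pv_getD_le_maxDeg adj x)
        refine ih (vset visited x) _ _ (tour ++ [x]) ?_ ?_
        · have := pv_meas adj x visited s₁' ((adj.getD x []).filter (fun nb => !vget (vset visited x) nb)) hP hvx
          simp only [List.length_cons] at hm this ⊢
          omega
        · exact pv_del_append _ _ (pv_del_mono (fun i h => pv_vle_vset visited x i h) hd)
    | @drop x s₁' s₂ hx hd =>
      rw [dfsB]
      simp only [hx, if_true]
      exact ih visited s₁' s₂ tour (by simp only [List.length_cons] at hm; omega) hd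

theorem pv_one_le_countF (vis : List Bool) (x : Int) (h : vget vis x = false) :
    1 ≤ vis.count false := by
  unfold vget at h
  cases hg : PySem.List.pyGet? vis x with
  | none => rw [hg] at h; simp at h
  | some b =>
    rw [hg] at h
    simp only [Option.getD_some] at h
    subst h
    exact List.count_pos_iff.mpr (PySem.List.mem_of_pyGet?_eq_some vis hg)

theorem pv_simGo (adj : PySem.Dict Int (List Int)) (fuel : Nat)
    (hA : ∀ (node : Int) (stack tour : List Int) (visited : List Bool),
      vget visited node = false → visited.count false ≤ fuel →
      dfsB adj (node :: stack) tour visited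
        = dfsB adj stack (dfsA fuel node adj tour visited).1 (dfsA fuel node adj tour visited).2
      ∧ (dfsA fuel node adj tour visited).2.count false ≤ visited.count false) :
    ∀ (nbs stack tour : List Int) (visited : List Bool), visited.count false ≤ fuel →
      dfsB adj (nbs ++ stack) tour visited
        = dfsB adj stack (dfsAGo fuel nbs adj tour visited).1 (dfsAGo fuel nbs adj tour visited).2
      ∧ (dfsAGo fuel nbs adj tour visited).2.count false ≤ visited.count false := by
  intro nbs
  induction nbs with
  | nil =>
    intro stack tour visited h
    rw [dfsAGo]
    exact ⟨rfl, le_refl _⟩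
  | cons nb rest ih =>
    intro stack tour visited h
    rw [dfsAGo]
    cases hv : vget visited nb with
    | true =>
      simp only [hv, if_true]
      rw [List.cons_append, dfsB]
      simp only [hv, if_true]
      exact ih stack tour visited h
    | false =>
      simp only [hv, Bool.false_eq_true, if_false]
      obtain ⟨hB, hcnt⟩ := hA nb (rest ++ stack) tour visited hv h
      obtain ⟨hB2, hcnt2⟩ := ih stack (dfsA fuel nb adj tour visited).1 (dfsA fuel nb adj tour visited).2
        (le_trans hcnt h)
      refine ⟨?_, le_trans hcnt2 hcnt⟩
      rw [List.cons_append, hB, hB2]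

theorem pv_simA (adj : PySem.Dict Int (List Int)) :
    ∀ (fuel : Nat) (node : Int) (stack tour : List Int) (visited : List Bool),
      vget visited node = false → visited.count false ≤ fuel →
      dfsB adj (node :: stack) tour visited
        = dfsB adj stack (dfsA fuel node adj tour visited).1 (dfsA fuel node adj tour visited).2
      ∧ (dfsA fuel node adj tour visited).2.count false ≤ visited.count false := by
  intro fuel
  induction fuel with
  | zero =>
    intro node stack tour visited hv hc
    exact absurd hc (by have := pv_one_le_countF visited node hv; omega)
  | succ f ih =>
    intro node stack tour visited hv hc
    rw [dfsA]
    have hc' : (vset visited node).count false ≤ f := by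
      have := pv_countF_vset_lt visited node hv
      omega
    obtain ⟨hGo, hcnt⟩ := pv_simGo adj f (fun n s t v hv' hc' => ih n s t v hv' hc')
      (adj.getD node []) stack (tour ++ [node]) (vset visited node) hc'
    constructor
    · rw [dfsB]
      simp only [hv, Bool.false_eq_true, if_false]
      rw [pv_pushed_eq]
      have hdel : PvDel (vset visited node)
          ((adj.getD node []) ++ stack)
          ((adj.getD node []).filter (fun nb => !vget (vset visited node) nb) ++ stack) :=
        pv_del_filter (vset visited node) (adj.getD node []) stack
      rw [pv_del_dfsB adj (((adj.getD node []) ++ stack).length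
            + (maxDeg adj + 1) * (vset visited node).count false)
          (vset visited node) _ _ (tour ++ [node]) (le_refl _) hdel] at *
      · exact hGo
    · calc (dfsAGo f (adj.getD node []) adj (tour ++ [node]) (vset visited node)).2.count false
          ≤ (vset visited node).count false := hcnt
        _ ≤ visited.count false := by
            have := pv_countF_vset_lt visited node hv
            omega

theorem pv_dfs_eq (adj : PySem.Dict Int (List Int)) (N : Nat) (r : Int)
    (h0 : 0 ≤ r) (h1 : r < (N : Int)) :
    stackTour adj r (N : Int) = (dfsA (N + 1) r adj [] (List.replicate N false)).1 := by
  unfold stackTour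
  rw [show ((N : Int)).toNat = N from Int.toNat_natCast N]
  have hv : vget (List.replicate N false) r = false := pv_vget_repl N r h0 (by exact_mod_cast h1)
  have hcnt : (List.replicate N false).count false ≤ N + 1 := by
    simp [List.count_replicate]
  obtain ⟨he, _⟩ := pv_simA adj (N + 1) r [] [] (List.replicate N false) hv hcnt
  rw [he, dfsB]


-- ---------- tour cost: (i+1) % len ≡ i-1 indexing (a rotation of the same sum) ----------
theorem pv_sum_rot (F G : Nat → Int) :
    ∀ (n : Nat), 0 < n → G 0 = F (n - 1) → (∀ k, k < n - 1 → G (k + 1) = F k) →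
      ((List.range n).map F).sum = ((List.range n).map G).sum := by
  intro n
  cases n with
  | zero => intro h; omega
  | succ m =>
    intro _ h0 hstep
    simp only [Nat.add_sub_cancel] at h0 hstep
    conv_lhs => rw [List.range_succ]
    conv_rhs => rw [List.range_succ_eq_map]
    simp only [List.map_append, List.map_cons, List.sum_append, List.sum_cons, List.map_map]
    have hc : (List.range m).map (G ∘ Nat.succ) = (List.range m).map F := by
      apply List.map_congr_left
      intro k hk
      exact hstep k (List.mem_range.mp hk)
    rw [hc, h0]
    simp [List.map_nil]
    omega

theorem pv_cost_eq (t : List Int) (dm : List (List Int)) : tour_cost t dm = costB t dm := by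
  unfold tour_cost costB
  simp only [PySem.List.len_eq]
  by_cases hne : t = []
  · subst hne
    simp [PySem.List.pyRange_one_eq_nil]
  · have hL : 0 < t.length := List.length_pos_iff.mpr hne
    rw [PySem.List.pyRange_one]
    simp only [sub_zero, Int.toNat_natCast, zero_add, List.map_map]
    apply pv_sum_rot _ _ t.length hL
    · show dget dm (PySem.List.pyGetD t (((0 : Nat) : Int) - 1) 0) (PySem.List.pyGetD t ((0 : Nat) : Int) 0)
        = dget dm (PySem.List.pyGetD t ((t.length - 1 : Nat) : Int) 0)
            (PySem.List.pyGetD t (PySem.Int.mod (((t.length - 1 : Nat) : Int) + 1) (t.length : Int)) 0)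
      have e1 : (((0 : Nat) : Int) - 1) = -1 := by norm_num
      have e2 : (((t.length - 1 : Nat) : Int) + 1) = (t.length : Int) := by
        push_cast [Nat.cast_sub (by omega : 1 ≤ t.length)]
        ring
      rw [e1, e2, PySem.List.pyGetD_neg_one t 0 hne]
      rw [show PySem.Int.mod (t.length : Int) (t.length : Int) = ((t.length % t.length : Nat) : Int) from
            PySem.Int.mod_natCast t.length t.length]
      rw [Nat.mod_self]
      congr 1
      rw [PySem.List.pyGetD_natCast]
      rw [List.getD_eq_getElem _ _ (by omega), List.getLast_eq_getElem]
    · intro k hk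
      show dget dm (PySem.List.pyGetD t (((k + 1 : Nat) : Int) - 1) 0) (PySem.List.pyGetD t ((k + 1 : Nat) : Int) 0)
        = dget dm (PySem.List.pyGetD t ((k : Nat) : Int) 0)
            (PySem.List.pyGetD t (PySem.Int.mod (((k : Nat) : Int) + 1) (t.length : Int)) 0)
      have e1 : (((k + 1 : Nat) : Int) - 1) = ((k : Nat) : Int) := by push_cast; ring
      have e2 : (((k : Nat) : Int) + 1) = ((k + 1 : Nat) : Int) := by push_cast; ring
      rw [e1, e2, show PySem.Int.mod (((k + 1 : Nat) : Int)) (t.length : Int)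
            = (((k + 1) % t.length : Nat) : Int) from PySem.Int.mod_natCast (k + 1) t.length]
      rw [Nat.mod_eq_of_lt (by omega)]

-- ---------- Python min(candidates, key=cost) ≡ the strict-< update loop ----------
theorem pv_min_cons (c : List Int) (ts : List (List Int)) (f : List Int → Int) :
    (PySem.List.min? (c :: ts) f).getD []
      = ts.foldl (fun best t => if f t < f best then t else best) c := by
  unfold PySem.List.min?
  refine Eq.trans (congrArg (fun o => Option.getD o ([] : List Int))
    (PySem.List.foldl_congr_mem (c :: ts) _
      (fun acc x => Option.elim acc (some x) (fun m => if f x < f m then some x else some m))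
      none
      (fun acc x _ => by cases acc <;> rfl))) ?_
  rw [List.foldl_cons]
  simp only [Option.elim_none]
  have hsome : ∀ (ts' : List (List Int)) (m : List Int),
      (ts'.foldl (fun acc x => Option.elim acc (some x) (fun m => if f x < f m then some x else some m)) (some m)).getD []
        = ts'.foldl (fun best t => if f t < f best then t else best) m := by
    intro ts'
    induction ts' with
    | nil => intro m; rfl
    | cons x t ih =>
      intro m
      simp only [List.foldl_cons, Option.elim_some]
      split_ifs
      · exact ih x
      · exact ih m
  exact hsome ts c

-- ---------- nodes of the adjacency list are MST endpoints ----------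
theorem pv_adj_keys_aux (x : Int) :
    ∀ (mst : List (Int × Int)) (d : PySem.Dict Int (List Int)),
      x ∈ (mst.foldl (fun d p => (d.modify p.1 [] (· ++ [p.2])).modify p.2 [] (· ++ [p.1])) d).keys →
      x ∈ d.keys ∨ ∃ e ∈ mst, x = e.1 ∨ x = e.2 := by
  intro mst
  induction mst with
  | nil => intro d h; exact Or.inl h
  | cons e rest ih =>
    intro d h
    rw [List.foldl_cons] at h
    rcases ih _ h with h' | h'
    · rw [PySem.Dict.keys_modify] at h'
      rcases (PySem.Dict.mem_keys_insert ..).mp h' with h'' | h''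
      · exact Or.inr ⟨e, List.mem_cons_self .., Or.inr h''⟩
      · rw [PySem.Dict.keys_modify] at h''
        rcases (PySem.Dict.mem_keys_insert ..).mp h'' with h3 | h3
        · exact Or.inr ⟨e, List.mem_cons_self .., Or.inl h3⟩
        · exact Or.inl h3
    · obtain ⟨e', he', hx⟩ := h'
      exact Or.inr ⟨e', List.mem_cons_of_mem _ he', hx⟩

theorem pv_root_mem_keys (tree : PySem.Dict Int (List Int)) (x : Int)
    (h : x ∈ rootNodes tree) : x ∈ tree.keys := by
  unfold rootNodes at h
  obtain ⟨p, hp, hx⟩ := List.mem_map.mp h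
  have hpi := List.mem_of_mem_filter hp
  subst hx
  exact PySem.Dict.mem_keys_of_mem_items (d := tree) hpi

theorem pv_roots_bounds (dm : List (List Int)) (hPre : Pre_construct_tour dm) (r : Int)
    (hr : r ∈ rootNodes (adjacency_list (primB dm))) :
    0 ≤ r ∧ r < (dm.length : Int) := by
  have hk := pv_root_mem_keys _ _ hr
  unfold adjacency_list at hk
  rcases pv_adj_keys_aux r (primB dm) PySem.Dict.empty hk with h | ⟨e, he, hx⟩
  · simp [PySem.Dict.keys_empty] at h
  · obtain ⟨h1, h2⟩ := (pv_prim_eq dm hPre).2 e he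
    rcases hx with rfl | rfl
    · exact ⟨h1.1, h1.2⟩
    · exact ⟨h2.1, h2.2⟩

-- ===== VERDICT (by name: the statement is the Claim_ definition above) =====
theorem construct_tour_spec : Claim_equal_construct_tour := by
  intro dm hDom hPre
  unfold Spec_construct_tour
  obtain ⟨hmeq, hbounds⟩ := pv_prim_eq dm hPre
  unfold construct_tour construct_tour_alt
  simp only [PySem.List.len_eq, Int.toNat_natCast, dget]
  rw [hmeq]
  simp only [pv_cost_eq]
  rw [pv_min_cons, List.foldl_map]
  refine PySem.List.foldl_congr_mem _ _ _ _ ?_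
  intro acc r hr
  obtain ⟨h0, h1⟩ := pv_roots_bounds dm hPre r hr
  rw [← pv_dfs_eq (adjacency_list (primB dm)) dm.length r h0 h1]
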